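-- pv_equiv track=rewrite | github.com/Sheaza/dialogpt-thor-chatbot-and-nlp-classes | lab7/porter.py | getForm
-- ===== SOURCE A (Python) =====
-- consonants = "bcdfghjklmnpqrstvwxyz"
--
-- def isConsonantWithException(word, i):
--     letter = word[i]
--     if letter in consonants:
--         if letter == 'y' and word[i-1] in consonants:
--             return False
--         else:
--             return True
--     else:
--         return False
--
-- def getForm(word: str):
--     form = []
--     formStr = ''
--     for i in range(len(word)):
--         if isConsonantWithException(word, i):
--             if i != 0:
--                 prev = form[-1]
--                 if prev != 'C':
--                     form.append('C')
--             else: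
--                 form.append('C')
--         else:
--             if i != 0:
--                 prev = form[-1]
--                 if prev != 'V':
--                     form.append('V')
--             else:
--                 form.append('V')
--     for j in form:
--         formStr += j
--     return formStr
-- ===== SOURCE B (Python) =====
-- consonants = "bcdfghjklmnpqrstvwxyz"
--
-- def isConsonantWithException(word, i):
--     letter = word[i]
--     if letter in consonants:
--         if letter == 'y' and word[i-1] in consonants:
--             return False
--         else:
--             return True
--     else:
--         return False
--
-- def collapse(p):
--     # divide-and-conquer run collapsing: collapse each half recursively, then
--     # merge, dropping the right part's head when it repeats the left's last label
--     if len(p) <= 1: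
--         return ''.join(p)
--     mid = len(p) // 2
--     left = collapse(p[:mid])
--     right = collapse(p[mid:])
--     if left[-1] == right[0]:
--         return left + right[1:]
--     return left + right
--
-- def getForm(word: str):
--     pattern = ['C' if isConsonantWithException(word, i) else 'V' for i in range(len(word))]
--     return collapse(pattern)
-- ===== Notes on version B (the rewrite author's own statement) =====
-- stated objective: alternative
-- what changed: A fuses labelling and run-collapsing into one left-to-right loop appending a label only when it differs from the last emitted one; B first materialises the whole per-character C/V label list and then collapses runs with a divide-and-conquer recursion that collapses each half and merges them, dropping the right half's leading label when it repeats the left half's last one.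
import Mathlib
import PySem

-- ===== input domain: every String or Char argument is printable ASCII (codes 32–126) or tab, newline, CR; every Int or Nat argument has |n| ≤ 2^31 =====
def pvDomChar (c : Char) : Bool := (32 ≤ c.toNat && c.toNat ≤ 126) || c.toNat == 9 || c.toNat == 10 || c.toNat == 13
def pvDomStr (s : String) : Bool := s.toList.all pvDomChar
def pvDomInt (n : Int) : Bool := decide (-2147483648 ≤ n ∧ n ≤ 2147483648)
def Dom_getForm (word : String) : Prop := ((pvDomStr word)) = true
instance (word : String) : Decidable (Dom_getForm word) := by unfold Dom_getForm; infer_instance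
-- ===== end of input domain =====

-- B materialises the full per-character C/V label list and collapses runs with a
-- divide-and-conquer merge, instead of A's fused append-if-different loop
-- (objective: alternative algorithm, similar cost).

-- ===== PORT A =====
def pvConsonants : List Char := "bcdfghjklmnpqrstvwxyz".toList

-- shared helper (Source B keeps it verbatim)
def isConsonantWithException (cs : List Char) (i : Int) : Bool :=
  match PySem.List.pyGet? cs i with
  | none => false  -- unreachable: both callers pass i in range(len(word))
  | some letter =>
    if pvConsonants.contains letter then
      if letter == 'y' &&
          (match PySem.List.pyGet? cs (i - 1) with
           | none => false  -- unreachable: i = 0 only reached on a nonempty word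
           | some p => pvConsonants.contains p) then
        false
      else
        true
    else
      false

def getForm (word : String) : String :=
  let cs := word.toList
  let form : List Char :=
    (PySem.List.pyRange 0 cs.length 1).foldl
      (fun form i =>
        if isConsonantWithException cs i then
          if i ≠ 0 then
            match PySem.List.pyGet? form (-1) with
            | none => form  -- unreachable: form is nonempty once i ≠ 0
            | some prev => if prev ≠ 'C' then form ++ ['C'] else form
          else form ++ ['C']
        else
          if i ≠ 0 then
            match PySem.List.pyGet? form (-1) with
            | none => form  -- unreachable: form is nonempty once i ≠ 0
            | some prev => if prev ≠ 'V' then form ++ ['V'] else form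
          else form ++ ['V'])
      []
  String.mk (form.foldl (fun formStr j => formStr ++ [j]) [])

-- ===== PORT B =====
-- Source B's collapse: divide and conquer over the label list; in the recursive
-- branch both halves are nonempty, so left[-1] / right[0] are the some-cases
-- of getLast? / head? (the catch-all is unreachable)
def pvCollapse (p : List Char) : List Char :=
  if _h : p.length ≤ 1 then p
  else
    let mid := p.length / 2
    let left := pvCollapse (p.take mid)
    let right := pvCollapse (p.drop mid)
    match left.getLast?, right.head? with
    | some lc, some rc => if lc = rc then left ++ right.tail else left ++ right
    | _, _ => left ++ right  -- unreachable
termination_by p.length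
decreasing_by
  · simp only [List.length_take]; omega
  · simp only [List.length_drop]; omega

def getForm_alt (word : String) : String :=
  let cs := word.toList
  let pattern : List Char :=
    (PySem.List.pyRange 0 cs.length 1).map
      (fun i => if isConsonantWithException cs i then 'C' else 'V')
  String.mk (pvCollapse pattern)

-- ===== PRECONDITION & SPEC =====
def Spec_getForm (word : String) (out : String) : Prop := out = getForm_alt word
instance (word : String) (out : String) : Decidable (Spec_getForm word out) := by unfold Spec_getForm; infer_instance

-- ===== CLAIM (what is proved, stated in full; the proofs are below) =====
def Claim_equal_getForm : Prop := ∀ (word : String), Dom_getForm word → Spec_getForm word (getForm word)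

-- ===== LEMMAS AND PROOFS =====

-- the label of position i
def pvLab (cs : List Char) (i : Int) : Char :=
  if isConsonantWithException cs i then 'C' else 'V'

-- reference run-collapse: collapse a label list given the previous raw label
def pvChain : Option Char → List Char → List Char
  | _, [] => []
  | pv, c :: t => if some c ≠ pv then c :: pvChain (some c) t else pvChain (some c) t

-- simplified A-step: append iff different from last emitted
def pvStepS (f : List Char) (c : Char) : List Char :=
  if f.getLast? ≠ some c then f ++ [c] else f

theorem pvFoldAppend (l acc : List Char) :
    l.foldl (fun a (j : Char) => a ++ [j]) acc = acc ++ l := by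
  induction l generalizing acc with
  | nil => simp
  | cons c t ih => simp [List.foldl, ih]

theorem pvChain_head (h : Char) (t : List Char) :
    pvChain none (h :: t) = h :: pvChain (some h) t := by
  simp [pvChain]

theorem pvChain_last (l : List Char) (h : Char) :
    (h :: pvChain (some h) l).getLast? = (h :: l).getLast? := by
  induction l generalizing h with
  | nil => rfl
  | cons a t ih =>
    by_cases hah : a = h
    · subst hah
      simp only [pvChain, ne_eq, not_true_eq_false, if_false]
      rw [ih a, List.getLast?_cons_cons]
    · have : some a ≠ some h := by simpa using hah
      simp only [pvChain, if_pos this]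
      rw [List.getLast?_cons_cons, List.getLast?_cons_cons, ih a]

-- splitting a chain at a concatenation: the right part continues from the raw last of the left
theorem pvChain_cons (pv : Option Char) (c : Char) (t : List Char) :
    pvChain pv (c :: t) =
      if some c ≠ pv then c :: pvChain (some c) t else pvChain (some c) t := rfl

theorem pvChain_split (l r : List Char) (c : Char) :
    ∀ pv, l.getLast? = some c →
      pvChain pv (l ++ r) = pvChain pv l ++ pvChain (some c) r := by
  induction l with
  | nil => intro pv h; simp at h
  | cons h t ih =>
    intro pv hlast
    cases t with
    | nil =>
      simp only [List.getLast?_singleton, Option.some.injEq] at hlast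
      subst hlast
      by_cases hp : some h ≠ pv <;> simp [pvChain, hp]
    | cons a s =>
      rw [List.getLast?_cons_cons] at hlast
      have hIH := ih (some h) hlast
      rw [List.cons_append, pvChain_cons, pvChain_cons (pv := pv) (c := h) (t := a :: s)]
      split_ifs with hp
      · simpa using hIH
      · simpa using hIH

-- continuing after label c versus from scratch: only the head may be dropped
theorem pvChain_cont (h : Char) (t : List Char) (c : Char) :
    pvChain (some c) (h :: t) =
      if h = c then (pvChain none (h :: t)).tail else pvChain none (h :: t) := by
  by_cases hc : h = c
  · subst hc
    simp [pvChain]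
  · have : some h ≠ some c := by simpa using hc
    simp [pvChain, this, hc]

theorem pvCollapse_eq_aux (n : Nat) :
    ∀ (p : List Char), p.length ≤ n → pvCollapse p = pvChain none p := by
  induction n with
  | zero =>
    intro p hp
    have : p = [] := List.eq_nil_of_length_eq_zero (Nat.le_zero.mp hp)
    subst this
    rw [pvCollapse]
    rfl
  | succ n ih =>
    intro p hp
    rw [pvCollapse]
    by_cases hle : p.length ≤ 1
    · rw [dif_pos hle]
      match p, hle with
      | [], _ => rfl
      | [c], _ => simp [pvChain]
    · rw [dif_neg hle]
      dsimp only
      have hmid1 : 1 ≤ p.length / 2 := by omega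
      have hmidlt : p.length / 2 < p.length := by omega
      have hmn : p.length / 2 ≤ n := by omega
      have ihl := ih (p.take (p.length / 2))
        (by rw [List.length_take]; exact le_trans (min_le_left _ _) hmn)
      have ihr := ih (p.drop (p.length / 2)) (by rw [List.length_drop]; omega)
      have htk : (p.take (p.length / 2)) ≠ [] := by
        apply List.ne_nil_of_length_pos
        rw [List.length_take]
        exact lt_min hmid1 (by omega)
      have hdp : (p.drop (p.length / 2)) ≠ [] := by
        apply List.ne_nil_of_length_pos
        rw [List.length_drop]
        omega
      obtain ⟨rh, rt, hr⟩ := List.exists_cons_of_ne_nil hdp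
      obtain ⟨c, hc⟩ : ∃ c, (p.take (p.length / 2)).getLast? = some c := by
        cases hlast : (p.take (p.length / 2)).getLast? with
        | none => exact absurd (List.getLast?_eq_none_iff.mp hlast) htk
        | some x => exact ⟨x, rfl⟩
      obtain ⟨lh, lt, hl⟩ := List.exists_cons_of_ne_nil htk
      have hp' : p = p.take (p.length / 2) ++ p.drop (p.length / 2) :=
        (List.take_append_drop (p.length / 2) p).symm
      have hlastL : (pvChain none (p.take (p.length / 2))).getLast? = some c := by
        rw [hl] at hc ⊢
        rw [pvChain_head, pvChain_last, hc]
      have hheadR : (pvChain none (p.drop (p.length / 2))).head? = some rh := by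
        rw [hr, pvChain_head]; rfl
      rw [ihl, ihr, hlastL, hheadR]
      show (if c = rh then _ ++ _ else _ ++ _) = pvChain none p
      conv_rhs => rw [hp']
      rw [pvChain_split _ _ c none hc]
      rw [hr, pvChain_cont rh rt c]
      by_cases hcr : c = rh
      · rw [if_pos hcr, if_pos hcr.symm]
      · rw [if_neg hcr, if_neg (fun h => hcr h.symm)]

theorem pvCollapse_eq (p : List Char) : pvCollapse p = pvChain none p :=
  pvCollapse_eq_aux p.length p le_rfl

theorem pvA2 (p : List Char) (f : List Char) :
    p.foldl pvStepS f = f ++ pvChain f.getLast? p := by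
  induction p generalizing f with
  | nil => simp [pvChain]
  | cons c t ih =>
    rw [List.foldl_cons]
    by_cases h : f.getLast? ≠ some c
    · have h' : some c ≠ f.getLast? := fun hc => h hc.symm
      have hs : pvStepS f c = f ++ [c] := by simp [pvStepS, h]
      rw [hs, ih, List.getLast?_concat]
      simp [pvChain, h']
    · push Not at h
      have hs : pvStepS f c = f := by simp [pvStepS, h]
      rw [hs, ih, h]
      simp [pvChain]

theorem pvA1 (cs : List Char) (idxs : List Int) (f : List Char)
    (hne : ∀ i ∈ idxs, i ≠ 0) (hf : f ≠ []) :
    idxs.foldl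
      (fun form i =>
        if isConsonantWithException cs i then
          if i ≠ 0 then
            match PySem.List.pyGet? form (-1) with
            | none => form
            | some prev => if prev ≠ 'C' then form ++ ['C'] else form
          else form ++ ['C']
        else
          if i ≠ 0 then
            match PySem.List.pyGet? form (-1) with
            | none => form
            | some prev => if prev ≠ 'V' then form ++ ['V'] else form
          else form ++ ['V']) f
      = (idxs.map (pvLab cs)).foldl pvStepS f := by
  induction idxs generalizing f with
  | nil => simp
  | cons i t ih =>
    have hi : i ≠ 0 := hne i (by simp)
    obtain ⟨x, hx⟩ : ∃ x, f.getLast? = some x := by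
      cases hlast : f.getLast? with
      | none => exact absurd (List.getLast?_eq_none_iff.mp hlast) hf
      | some x => exact ⟨x, rfl⟩
    have hget : PySem.List.pyGet? f (-1) = some x := by
      rw [PySem.List.pyGet?_neg_one, hx]
    simp only [List.foldl, List.map_cons, if_pos hi, hget]
    have step : ∀ c : Char,
        (if x ≠ c then f ++ [c] else f) = pvStepS f c := by
      intro c
      simp only [pvStepS, hx, ne_eq, Option.some.injEq]
    by_cases hc : isConsonantWithException cs i
    · have hl : pvLab cs i = 'C' := by simp [pvLab, hc]
      rw [if_pos hc, hl, step 'C']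
      rw [ih _ (fun j hj => hne j (by simp [hj]))
            (by simp [pvStepS]; split <;> simp [hf])]
    · have hl : pvLab cs i = 'V' := by simp [pvLab, hc]
      rw [if_neg hc, hl, step 'V']
      rw [ih _ (fun j hj => hne j (by simp [hj]))
            (by simp [pvStepS]; split <;> simp [hf])]

-- ===== VERDICT (by name: the statement is the Claim_ definition above) =====
theorem getForm_spec : Claim_equal_getForm := by
  intro word _
  unfold Spec_getForm getForm getForm_alt
  dsimp only
  set cs := word.toList with hcs
  rw [pvCollapse_eq]
  by_cases hn : cs.length = 0
  · simp [hn, PySem.List.pyRange_one_eq_nil, pvChain]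
  · have hpos : (0 : Int) < (cs.length : Int) := by
      have := Nat.pos_of_ne_zero hn; exact_mod_cast this
    rw [PySem.List.pyRange_one_cons hpos]
    simp only [List.foldl, List.map_cons]
    -- first iteration (i = 0) appends the first label in A
    have hstep0 : ∀ (b : Bool),
        (if b then
          (if (0 : Int) ≠ 0 then
            match PySem.List.pyGet? ([] : List Char) (-1) with
            | none => ([] : List Char)
            | some prev => if prev ≠ 'C' then [] ++ ['C'] else []
          else [] ++ ['C'])
        else
          (if (0 : Int) ≠ 0 then
            match PySem.List.pyGet? ([] : List Char) (-1) with
            | none => ([] : List Char)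
            | some prev => if prev ≠ 'V' then [] ++ ['V'] else []
          else [] ++ ['V'])) = [if b then 'C' else 'V'] := by
      intro b; cases b <;> simp
    rw [hstep0]
    have htail : ∀ i ∈ PySem.List.pyRange 1 (cs.length) 1, i ≠ 0 := by
      intro i hi
      have := (PySem.List.mem_pyRange_one).mp hi
      omega
    simp only [zero_add]
    rw [pvA1 cs _ _ htail (by simp)]
    rw [pvA2]
    have hlab0 : (if isConsonantWithException cs 0 then 'C' else 'V') = pvLab cs 0 := rfl
    rw [pvChain_head]
    simp only [List.getLast?_singleton, hlab0]
    congr 1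
    rw [pvFoldAppend]
    rfl
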